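-- pv_equiv track=rewrite | github.com/ynghan/Algorithm_BaekjoonAndProgrammers | 프로그래머스/0/181935. 홀짝에 따라 다른 값 반환하기/홀짝에 따라 다른 값 반환하기.py | solution
-- ===== SOURCE A (Python) =====
-- def solution(n):
--     answer = 0
--     if n % 2 == 0: # 짝수
--         for i in range(int(n / 2)+1):
--             answer += (i*2)**2
--     else: # 홀수
--         for i in range(int(n / 2)+1):
--             answer += (2*i+1)
--     return answer
-- ===== SOURCE B (Python) =====
-- def solution(n):
--     # Closed-form: even n -> 0^2 + 2^2 + ... + n^2; odd n -> 1 + 3 + ... + n.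
--     m = n // 2
--     if n % 2 == 0:
--         return 2 * m * (m + 1) * (2 * m + 1) // 3
--     else:
--         return (m + 1) ** 2
-- ===== Notes on version B (the rewrite author's own statement) =====
-- stated objective: faster
-- what changed: Replaces the O(n) accumulation loop over the half-range with closed-form arithmetic (the sum-of-squares formula for the even case, the square of the count of odds for the odd case); Pre_ excludes negative n, where A's values (zero from an empty range, or a spurious one from int(n/2) truncating toward zero) are accidents of the implementation outside the problem's nonnegative domain.
-- outside the precondition, e.g. on solution(-4): A returns 0, B returns -4; on solution(-1): A returns 1, B returns 0
import Mathlib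
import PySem

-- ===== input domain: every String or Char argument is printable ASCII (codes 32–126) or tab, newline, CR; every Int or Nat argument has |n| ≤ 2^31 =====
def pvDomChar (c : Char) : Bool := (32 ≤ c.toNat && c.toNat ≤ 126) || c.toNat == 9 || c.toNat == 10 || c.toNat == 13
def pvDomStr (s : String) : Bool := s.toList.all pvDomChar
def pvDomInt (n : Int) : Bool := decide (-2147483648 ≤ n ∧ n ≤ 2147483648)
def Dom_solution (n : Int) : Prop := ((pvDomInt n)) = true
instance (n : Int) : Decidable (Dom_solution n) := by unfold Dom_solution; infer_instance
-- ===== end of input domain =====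

-- B replaces A's O(n) summation loop with closed-form formulas; proved equal on the nonnegative domain.

-- ===== PORT A =====
-- int(n / 2) is exact truncating division for |n| ≤ 2^31 (float is exact there): PySem.Int.truncdiv.
def solution (n : Int) : Int :=
  if PySem.Int.mod n 2 = 0 then
    (PySem.List.pyRange 0 (PySem.Int.truncdiv n 2 + 1) 1).foldl (fun answer i => answer + (i * 2) ^ 2) 0
  else
    (PySem.List.pyRange 0 (PySem.Int.truncdiv n 2 + 1) 1).foldl (fun answer i => answer + (2 * i + 1)) 0

-- ===== PORT B =====
def solution_alt (n : Int) : Int :=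
  let m := PySem.Int.floordiv n 2
  if PySem.Int.mod n 2 = 0 then
    PySem.Int.floordiv (2 * m * (m + 1) * (2 * m + 1)) 3
  else
    (m + 1) ^ 2

-- ===== PRECONDITION & SPEC =====
-- Pre_ excludes negative n, where A's values (zero from an empty range, or a spurious one
-- from int(n/2) truncating toward zero) are accidents of the implementation outside the
-- problem's nonnegative domain.
def Pre_solution (n : Int) : Prop := 0 ≤ n
instance (n : Int) : Decidable (Pre_solution n) := by unfold Pre_solution; infer_instance
def pvWitness_solution : Int := (6)

def Spec_solution (n : Int) (out : Int) : Prop := out = solution_alt n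
instance (n : Int) (out : Int) : Decidable (Spec_solution n out) := by unfold Spec_solution; infer_instance

-- ===== CLAIM (what is proved, stated in full; the proofs are below) =====
def Claim_equal_solution : Prop := ∀ (n : Int), Dom_solution n → Pre_solution n → Spec_solution n (solution n)

-- ===== LEMMAS AND PROOFS =====

-- A's even loop, summed in closed form (times 3, to stay in ℤ).
lemma evenLoop (t : Nat) :
    ((PySem.List.pyRange 0 ((t : Int) + 1) 1).foldl (fun a i => a + (i * 2) ^ 2) 0) * 3
      = 2 * (t : Int) * ((t : Int) + 1) * (2 * (t : Int) + 1) := by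
  induction t with
  | zero => decide
  | succ t ih =>
      have h : PySem.List.pyRange 0 (((t + 1 : Nat) : Int) + 1) 1
          = PySem.List.pyRange 0 ((t : Int) + 1) 1 ++ [(t : Int) + 1] := by
        push_cast
        exact PySem.List.pyRange_one_succ_right (by positivity)
      rw [h, List.foldl_append]
      simp only [List.foldl]
      push_cast
      linear_combination ih

-- A's odd loop, summed in closed form.
lemma oddLoop (t : Nat) :
    (PySem.List.pyRange 0 ((t : Int) + 1) 1).foldl (fun a i => a + (2 * i + 1)) 0
      = ((t : Int) + 1) ^ 2 := by
  induction t with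
  | zero => decide
  | succ t ih =>
      have h : PySem.List.pyRange 0 (((t + 1 : Nat) : Int) + 1) 1
          = PySem.List.pyRange 0 ((t : Int) + 1) 1 ++ [(t : Int) + 1] := by
        push_cast
        exact PySem.List.pyRange_one_succ_right (by positivity)
      rw [h, List.foldl_append]
      simp only [List.foldl]
      push_cast
      linear_combination ih

-- ===== VERDICT (by name: the statement is the Claim_ definition above) =====
theorem solution_spec : Claim_equal_solution := by
  intro n _ hn
  unfold Spec_solution solution solution_alt
  simp only [PySem.Int.mod, PySem.Int.floordiv, PySem.Int.truncdiv]
  have hfd : n.fdiv 2 = n / 2 := Int.fdiv_eq_ediv_of_nonneg n (by norm_num)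
  have htd : n.tdiv 2 = n / 2 := Int.tdiv_eq_ediv_of_nonneg hn
  rw [hfd, htd]
  obtain ⟨t, ht⟩ : ∃ t : Nat, n / 2 = (t : Int) :=
    ⟨(n / 2).toNat, (Int.toNat_of_nonneg (Int.ediv_nonneg hn (by norm_num))).symm⟩
  rw [ht]
  by_cases hpar : n.fmod 2 = 0
  · rw [if_pos hpar, if_pos hpar]
    have h3 : 2 * (t : Int) * ((t : Int) + 1) * (2 * (t : Int) + 1)
        = 3 * ((PySem.List.pyRange 0 ((t : Int) + 1) 1).foldl (fun a i => a + (i * 2) ^ 2) 0) := by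
      linarith [evenLoop t]
    rw [h3, Int.mul_fdiv_cancel_left _ (by norm_num)]
  · rw [if_neg hpar, if_neg hpar, oddLoop t]
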